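-- pv_equiv track=rewrite | github.com/simon03instru/AWS-anomalies-detection-diagnosis | anomaly_detection/analyze_anomaly/anomaly_detection_calculator.py | apply_lag_tolerance
-- ===== SOURCE A (Python) =====
-- def apply_lag_tolerance(gt, pred, lag_tolerance=1):
--     """
--     Apply lag tolerance: Convert predictions that occur within lag_tolerance timesteps
--     of a ground truth anomaly into correct detections.
--
--     This handles:
--     - Lagged detections after anomaly ends (t+1, t+2, etc.)
--     - Early detections before anomaly starts (t-1, t-2, etc.)
--     - Detections within anomalous segments
--
--     Args:
--         gt: ground truth labels
--         pred: predictions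
--         lag_tolerance: number of timesteps to allow detection delay/early (default: 1)
--
--     Returns:
--         adjusted_pred: predictions adjusted for lag tolerance
--     """
--     adjusted_pred = pred.copy()
--
--     # Find all GT anomalous segments
--     gt_segments = []
--     i = 0
--     while i < len(gt):
--         if gt[i] == 1:
--             start = i
--             while i < len(gt) and gt[i] == 1:
--                 i += 1
--             end = i - 1
--             gt_segments.append((start, end))
--         else:
--             i += 1
--
--     # For each GT segment, check predictions within tolerance window
--     for seg_start, seg_end in gt_segments:
--         # Define detection window: from (seg_start - lag_tolerance) to (seg_end + lag_tolerance)
--         window_start = max(0, seg_start - lag_tolerance)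
--         window_end = min(len(gt) - 1, seg_end + lag_tolerance)
--
--         # Check if any prediction exists in this window
--         detection_found = False
--         for j in range(window_start, window_end + 1):
--             if pred[j] == 1:
--                 detection_found = True
--                 break
--
--         # If detection found within lag window, mark entire segment as detected
--         if detection_found:
--             for j in range(seg_start, seg_end + 1):
--                 adjusted_pred[j] = 1
--
--             # Also mark lagged/early detections as part of anomaly (convert FP to TP)
--             for j in range(window_start, window_end + 1):
--                 if pred[j] == 1 and (j < seg_start or j > seg_end):
--                     # This is a lagged or early detection - mark it as TP
--                     adjusted_pred[j] = 1
--
--     return adjusted_pred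
-- ===== SOURCE B (Python) =====
-- def apply_lag_tolerance(gt, pred, lag_tolerance=1):
--     """Prefix-sum reimplementation: one pass over gt, O(1) window tests."""
--     n = len(gt)
--     # P[k] = number of detections (pred[j] == 1) among j < k
--     P = [0]
--     for j in range(n):
--         P.append(P[-1] + (1 if pred[j] == 1 else 0))
--     adjusted = pred.copy()
--     i = 0
--     while i < n:
--         if gt[i] == 1:
--             start = i
--             while i < n and gt[i] == 1:
--                 i += 1
--             end = i - 1
--             ws = max(0, start - lag_tolerance)
--             we = min(n - 1, end + lag_tolerance)
--             if ws <= we and P[we + 1] - P[ws] > 0: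
--                 for j in range(start, end + 1):
--                     adjusted[j] = 1
--         else:
--             i += 1
--     return adjusted
-- ===== Notes on version B (the rewrite author's own statement) =====
-- stated objective: alternative
-- what changed: B builds a prefix-sum table of detections once and tests each GT segment's tolerance window with one O(1) subtraction in a single fused pass, instead of A's collect-segments-then-rescan-each-window approach, and drops A's no-op 'mark lagged detections' loop.
-- outside the precondition, e.g. on apply_lag_tolerance([0], [], 1): A returns [], B raises IndexError
import Mathlib
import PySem

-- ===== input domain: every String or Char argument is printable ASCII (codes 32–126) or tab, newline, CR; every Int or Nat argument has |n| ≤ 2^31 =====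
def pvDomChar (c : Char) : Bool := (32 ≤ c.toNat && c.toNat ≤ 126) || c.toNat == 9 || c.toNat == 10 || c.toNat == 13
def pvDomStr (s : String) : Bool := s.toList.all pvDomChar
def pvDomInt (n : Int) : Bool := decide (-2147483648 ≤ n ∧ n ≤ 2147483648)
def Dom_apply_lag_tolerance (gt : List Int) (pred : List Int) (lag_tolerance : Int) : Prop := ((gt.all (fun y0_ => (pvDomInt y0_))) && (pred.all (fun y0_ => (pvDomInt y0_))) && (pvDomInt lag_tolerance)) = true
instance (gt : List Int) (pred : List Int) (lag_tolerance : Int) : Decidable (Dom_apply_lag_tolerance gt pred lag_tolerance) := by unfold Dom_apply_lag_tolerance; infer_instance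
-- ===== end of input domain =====

-- B replaces A's per-segment window scans by a prefix-sum table of detections (one O(1)
-- subtraction per segment) and drops A's provably no-op "mark lagged detections" loop;
-- objective: alternative single-pass algorithm.

-- ===== PORT A =====
-- fuel-based inner while 'while i < len(gt) and gt[i] == 1: i += 1' (fuel = len(gt) - i suffices)
def pvAdvA (gt : List Int) : Nat → Nat → Nat
  | 0, i => i
  | f+1, i => if i < gt.length ∧ gt.getD i 0 = 1 then pvAdvA gt f (i+1) else i

theorem pvAdvA_le (gt : List Int) (f i : Nat) : i ≤ pvAdvA gt f i := by
  induction f generalizing i with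
  | zero => simp [pvAdvA]
  | succ f ih =>
    simp only [pvAdvA]
    split
    · exact le_trans (Nat.le_succ i) (ih (i+1))
    · exact le_refl i

-- cited by pvSegsA's and pvLoopB's decreasing_by
theorem pvAdvA_lt (gt : List Int) (i : Nat) (h1 : i < gt.length) (h2 : gt.getD i 0 = 1) :
    i < pvAdvA gt (gt.length - i) i := by
  have hf : gt.length - i = (gt.length - i - 1) + 1 := by omega
  rw [hf]
  simp only [pvAdvA, if_pos (And.intro h1 h2)]
  exact lt_of_lt_of_le (Nat.lt_succ_self i) (pvAdvA_le gt _ (i+1))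

-- A's outer while loop collecting the GT anomalous segments (start, end)
def pvSegsA (gt : List Int) (i : Nat) : List (Int × Int) :=
  if h : i < gt.length then
    if hg : gt.getD i 0 = 1 then
      ((i : Int), ((pvAdvA gt (gt.length - i) i : Nat) : Int) - 1) :: pvSegsA gt (pvAdvA gt (gt.length - i) i)
    else pvSegsA gt (i+1)
  else []
termination_by gt.length - i
decreasing_by
  · have := pvAdvA_lt gt i h hg; omega
  · omega

-- indices written (window/segment positions) are ≥ 0, so 'adjusted_pred[j] = 1' is List.set at j.toNat
def apply_lag_tolerance (gt : List Int) (pred : List Int) (lag_tolerance : Int) : List Int :=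
  (pvSegsA gt 0).foldl (fun adj seg =>
    let window_start := max 0 (seg.1 - lag_tolerance)
    let window_end := min ((gt.length : Int) - 1) (seg.2 + lag_tolerance)
    let detection_found := (PySem.List.pyRange window_start (window_end + 1) 1).any
        (fun j => PySem.List.pyGetD pred j 0 == 1)
    if detection_found then
      ((PySem.List.pyRange window_start (window_end + 1) 1).foldl
        (fun a j => if PySem.List.pyGetD pred j 0 == 1 && (decide (j < seg.1) || decide (seg.2 < j))
                    then a.set j.toNat 1 else a)
        ((PySem.List.pyRange seg.1 (seg.2 + 1) 1).foldl (fun a j => a.set j.toNat 1) adj))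
    else adj) pred

-- ===== PORT B =====
-- B's inner while (same advance loop, B's own copy)
def pvAdvB (gt : List Int) : Nat → Nat → Nat
  | 0, i => i
  | f+1, i => if i < gt.length ∧ gt.getD i 0 = 1 then pvAdvB gt f (i+1) else i

-- cited by pvLoopB's decreasing_by
theorem pvAdvB_eq (gt : List Int) (f i : Nat) : pvAdvB gt f i = pvAdvA gt f i := by
  induction f generalizing i with
  | zero => rfl
  | succ f ih => simp only [pvAdvB, pvAdvA]; split <;> simp [ih]

-- B's single pass: find a segment, test its window by one prefix-sum subtraction, write it
def pvLoopB (gt : List Int) (P : List Int) (lag : Int) (adj : List Int) (i : Nat) : List Int :=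
  if h : i < gt.length then
    if hg : gt.getD i 0 = 1 then
      pvLoopB gt P lag
        (let e : Int := ((pvAdvB gt (gt.length - i) i : Nat) : Int) - 1
         let ws := max 0 ((i : Int) - lag)
         let we := min ((gt.length : Int) - 1) (e + lag)
         if ws ≤ we ∧ PySem.List.pyGetD P (we+1) 0 - PySem.List.pyGetD P ws 0 > 0 then
           (PySem.List.pyRange (i : Int) (e+1) 1).foldl (fun a j => a.set j.toNat 1) adj
         else adj)
        (pvAdvB gt (gt.length - i) i)
    else pvLoopB gt P lag adj (i+1)
  else adj
termination_by gt.length - i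
decreasing_by
  · rw [pvAdvB_eq]; have := pvAdvA_lt gt i h hg; omega
  · omega

def apply_lag_tolerance_alt (gt : List Int) (pred : List Int) (lag_tolerance : Int) : List Int :=
  pvLoopB gt
    ((PySem.List.pyRange 0 (gt.length : Int) 1).foldl
      (fun acc j => acc ++ [PySem.List.pyGetD acc (-1) 0 +
        (if PySem.List.pyGetD pred j 0 = 1 then 1 else 0)]) [0])
    lag_tolerance pred 0

-- ===== PRECONDITION & SPEC =====
-- Pre_ excludes pred shorter than gt: there A's window scans raise IndexError whenever a GT
-- segment has a window position beyond pred (and B's prefix pass raises whenever gt is nonempty).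
def Pre_apply_lag_tolerance (gt : List Int) (pred : List Int) (lag_tolerance : Int) : Prop :=
  gt.length ≤ pred.length
instance (gt : List Int) (pred : List Int) (lag_tolerance : Int) : Decidable (Pre_apply_lag_tolerance gt pred lag_tolerance) := by unfold Pre_apply_lag_tolerance; infer_instance

def pvWitness_apply_lag_tolerance : List Int × List Int × Int := ([0, 1, 1, 0], [0, 0, 0, 1], 1)

def Spec_apply_lag_tolerance (gt : List Int) (pred : List Int) (lag_tolerance : Int) (out : List Int) : Prop := out = apply_lag_tolerance_alt gt pred lag_tolerance
instance (gt : List Int) (pred : List Int) (lag_tolerance : Int) (out : List Int) : Decidable (Spec_apply_lag_tolerance gt pred lag_tolerance out) := by unfold Spec_apply_lag_tolerance; infer_instance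

-- ===== CLAIM (what is proved, stated in full; the proofs are below) =====
def Claim_equal_apply_lag_tolerance : Prop := ∀ (gt : List Int) (pred : List Int) (lag_tolerance : Int), Dom_apply_lag_tolerance gt pred lag_tolerance → Pre_apply_lag_tolerance gt pred lag_tolerance → Spec_apply_lag_tolerance gt pred lag_tolerance (apply_lag_tolerance gt pred lag_tolerance)

-- ===== LEMMAS AND PROOFS =====

-- number of detections among positions < k
def pvCnt (pred : List Int) (k : Nat) : Nat := (List.range k).countP (fun j => pred.getD j 0 = 1)

-- mathematical form of B's prefix table
def pvPm (pred : List Int) (n : Nat) : List Int := (List.range (n+1)).map (fun k => (pvCnt pred k : Nat))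

-- A's per-segment fold function (the literal lambda of the port)
def pvStepA (gt : List Int) (pred : List Int) (lag_tolerance : Int) (adj : List Int) (seg : Int × Int) : List Int :=
    let window_start := max 0 (seg.1 - lag_tolerance)
    let window_end := min ((gt.length : Int) - 1) (seg.2 + lag_tolerance)
    let detection_found := (PySem.List.pyRange window_start (window_end + 1) 1).any
        (fun j => PySem.List.pyGetD pred j 0 == 1)
    if detection_found then
      ((PySem.List.pyRange window_start (window_end + 1) 1).foldl
        (fun a j => if PySem.List.pyGetD pred j 0 == 1 && (decide (j < seg.1) || decide (seg.2 < j))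
                    then a.set j.toNat 1 else a)
        ((PySem.List.pyRange seg.1 (seg.2 + 1) 1).foldl (fun a j => a.set j.toNat 1) adj))
    else adj

-- B's per-segment update as a fold function
def pvStepB (gt : List Int) (P : List Int) (lag : Int) (adj : List Int) (seg : Int × Int) : List Int :=
  let ws := max 0 (seg.1 - lag)
  let we := min ((gt.length : Int) - 1) (seg.2 + lag)
  if ws ≤ we ∧ PySem.List.pyGetD P (we+1) 0 - PySem.List.pyGetD P ws 0 > 0 then
    (PySem.List.pyRange seg.1 (seg.2+1) 1).foldl (fun a j => a.set j.toNat 1) adj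
  else adj

-- the state invariant: adj is pred with some positions overwritten by 1
def pvInv (pred adj : List Int) : Prop :=
  adj.length = pred.length ∧ ∀ k : Nat, adj.getD k 0 = pred.getD k 0 ∨ adj.getD k 0 = 1

theorem pvGetD_set (a : List Int) (m k : Nat) (x : Int) :
    (a.set m x).getD k 0 = if m = k ∧ m < a.length then x else a.getD k 0 := by
  simp only [List.getD_eq_getElem?_getD, List.getElem?_set]
  split_ifs <;> (try rfl) <;> (try simp_all) <;> omega

theorem pvSet_noop (a : List Int) (m : Nat) (hm : m < a.length) (h1 : a.getD m 0 = 1) :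
    a.set m 1 = a := by
  apply List.ext_getElem?
  intro k
  rw [List.getElem?_set]
  split_ifs with h
  · subst h
    simp only [List.getElem?_eq_getElem hm]
    rw [List.getD_eq_getElem?_getD, List.getElem?_eq_getElem hm] at h1
    simpa using h1.symm
  · rfl

theorem pvWr_inv (pred : List Int) (l : List Int) (adj : List Int) (h : pvInv pred adj) :
    pvInv pred (l.foldl (fun a j => a.set j.toNat 1) adj) := by
  induction l generalizing adj with
  | nil => exact h
  | cons j t ih =>
    apply ih
    refine ⟨by simpa using h.1, fun k => ?_⟩
    rw [pvGetD_set]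
    split_ifs with hc
    · exact Or.inr rfl
    · exact h.2 k

theorem pvFoldl_cond_set_noop (c : Int → Bool) (l : List Int) (adj : List Int)
    (h : ∀ j ∈ l, c j = true → adj.set j.toNat 1 = adj) :
    l.foldl (fun a j => if c j then a.set j.toNat 1 else a) adj = adj := by
  induction l with
  | nil => rfl
  | cons j t ih =>
    simp only [List.foldl_cons]
    by_cases hc : c j = true
    · rw [if_pos hc, h j (List.mem_cons_self) hc]
      exact ih (fun j' hj' => h j' (List.mem_cons_of_mem _ hj'))
    · rw [if_neg hc]
      exact ih (fun j' hj' => h j' (List.mem_cons_of_mem _ hj'))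

theorem pvCnt_succ (pred : List Int) (n : Nat) :
    pvCnt pred (n+1) = pvCnt pred n + (if pred.getD n 0 = 1 then 1 else 0) := by
  simp [pvCnt, List.range_succ, List.countP_append, List.countP_cons]

theorem pvCnt_lt_iff (pred : List Int) (a b : Nat) (hab : a ≤ b) :
    pvCnt pred a < pvCnt pred b ↔ ∃ j : Nat, a ≤ j ∧ j < b ∧ pred.getD j 0 = 1 := by
  have hb : b = a + (b - a) := by omega
  rw [hb, pvCnt, pvCnt, List.range_add, List.countP_append]
  constructor
  · intro h
    have hpos : 0 < List.countP (fun j => decide (pred.getD j 0 = 1))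
        ((List.range (b-a)).map (fun x => a + x)) := by omega
    rw [List.countP_pos_iff] at hpos
    obtain ⟨j, hj, hp⟩ := hpos
    simp only [List.mem_map, List.mem_range] at hj
    obtain ⟨x, hx, rfl⟩ := hj
    exact ⟨a + x, by omega, by omega, by simpa using hp⟩
  · intro ⟨j, h1, h2, h3⟩
    have hpos : 0 < List.countP (fun j => decide (pred.getD j 0 = 1))
        ((List.range (b-a)).map (fun x => a + x)) := by
      rw [List.countP_pos_iff]
      exact ⟨j, by simp only [List.mem_map, List.mem_range]; exact ⟨j - a, by omega, by omega⟩,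
        by simpa using h3⟩
    omega

theorem pvPm_length (pred : List Int) (n : Nat) : (pvPm pred n).length = n + 1 := by
  simp [pvPm]

theorem pyGetD_neg_one (l : List Int) (h : l ≠ []) :
    PySem.List.pyGetD l (-1) 0 = l.getD (l.length - 1) 0 := by
  have hl : 0 < l.length := List.length_pos_iff.mpr h
  simp only [PySem.List.pyGetD, PySem.List.pyGet?, PySem.List.pyIdx?]
  rw [if_neg (by omega), if_pos (by exact_mod_cast by omega : -(l.length : Int) ≤ -1)]
  simp [List.getD_eq_getElem?_getD]

theorem pvPm_succ (pred : List Int) (n : Nat) :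
    pvPm pred (n+1) = pvPm pred n ++ [(pvCnt pred (n+1) : Int)] := by
  simp [pvPm, List.range_succ]

theorem pvBuildP_eq (pred : List Int) (n : Nat) :
    (PySem.List.pyRange 0 (n : Int) 1).foldl
      (fun acc j => acc ++ [PySem.List.pyGetD acc (-1) 0 +
        (if PySem.List.pyGetD pred j 0 = 1 then 1 else 0)]) [0] = pvPm pred n := by
  rw [PySem.List.pyRange_zero_natCast, List.foldl_map]
  induction n with
  | zero => simp [pvPm, pvCnt]
  | succ n ih =>
    rw [List.range_succ, List.foldl_append, ih, List.foldl_cons, List.foldl_nil, pvPm_succ]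
    congr 1
    have hne : pvPm pred n ≠ [] := by simp [pvPm]
    rw [pyGetD_neg_one _ hne, pvPm_length]
    have hget : (pvPm pred n).getD n 0 = (pvCnt pred n : Int) := by
      simp [pvPm, List.getD_eq_getElem?_getD, List.getElem?_range (by omega : n < n + 1)]
    simp only [Nat.add_sub_cancel, hget, PySem.List.pyGetD_natCast, pvCnt_succ]
    split_ifs <;> (try push_cast) <;> simp

theorem pvPm_getD (pred : List Int) (n : Nat) (k : Int) (h0 : 0 ≤ k) (hk : k ≤ (n : Int)) :
    PySem.List.pyGetD (pvPm pred n) k 0 = (pvCnt pred k.toNat : Int) := by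
  rw [PySem.List.pyGetD_of_nonneg _ _ h0]
  have hkn : k.toNat < n + 1 := by omega
  rw [pvPm, List.getD_eq_getElem?_getD]
  simp [List.getElem?_range hkn]

theorem pvAdvA_le_add (gt : List Int) (f i : Nat) : pvAdvA gt f i ≤ i + f := by
  induction f generalizing i with
  | zero => simp [pvAdvA]
  | succ f ih =>
    simp only [pvAdvA]
    split
    · exact le_trans (ih (i+1)) (by omega)
    · omega

-- every collected segment satisfies i ≤ start ≤ end < len(gt)
theorem pvSegs_bounds (gt : List Int) (i : Nat) :
    ∀ se ∈ pvSegsA gt i, (i : Int) ≤ se.1 ∧ se.1 ≤ se.2 ∧ se.2 < (gt.length : Int) := by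
  induction i using pvSegsA.induct gt with
  | case1 i h hg ih =>
    intro se hse
    rw [pvSegsA, dif_pos h, dif_pos hg] at hse
    rcases List.mem_cons.mp hse with hhd | htl
    · subst hhd
      have h1 := pvAdvA_lt gt i h hg
      have h2 := pvAdvA_le_add gt (gt.length - i) i
      refine ⟨le_refl _, ?_, ?_⟩ <;> simp <;> omega
    · have := ih se htl
      have h1 := pvAdvA_le gt (gt.length - i) i
      exact ⟨le_trans (by exact_mod_cast h1) this.1, this.2⟩
  | case2 i h hg ih =>
    intro se hse
    rw [pvSegsA, dif_pos h, dif_neg hg] at hse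
    have := ih se hse
    exact ⟨le_trans (by exact_mod_cast Nat.le_succ i) this.1, this.2⟩
  | case3 i h =>
    intro se hse
    rw [pvSegsA, dif_neg h] at hse
    simp at hse

theorem pvLoopB_eq_fold (gt P : List Int) (lag : Int) (adj : List Int) (i : Nat) :
    pvLoopB gt P lag adj i = (pvSegsA gt i).foldl (pvStepB gt P lag) adj := by
  induction adj, i using pvLoopB.induct gt P lag with
  | case1 adj i h hg ih =>
    rw [pvLoopB, dif_pos h, dif_pos hg, pvSegsA, dif_pos h, dif_pos hg, List.foldl_cons]
    simp only [dite_eq_ite, pvAdvB_eq] at ih ⊢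
    rw [ih]
    rfl
  | case2 adj i h hg ih =>
    rw [pvLoopB, dif_pos h, dif_neg hg, pvSegsA, dif_pos h, dif_neg hg]
    exact ih
  | case3 adj i h =>
    rw [pvLoopB, dif_neg h, pvSegsA, dif_neg h]
    rfl

theorem pvStep_eq (gt pred : List Int) (lag : Int) (adj : List Int) (seg : Int × Int)
    (hb : 0 ≤ seg.1 ∧ seg.1 ≤ seg.2 ∧ seg.2 < (gt.length : Int))
    (hnp : gt.length ≤ pred.length) (hinv : pvInv pred adj) :
    pvStepA gt pred lag adj seg = pvStepB gt (pvPm pred gt.length) lag adj seg := by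
  obtain ⟨hs0, hse, hen⟩ := hb
  have hA : pvStepA gt pred lag adj seg =
      if ((PySem.List.pyRange (max 0 (seg.1 - lag)) ((min ((gt.length : Int) - 1) (seg.2 + lag)) + 1) 1).any
          (fun j => PySem.List.pyGetD pred j 0 == 1)) = true then
        ((PySem.List.pyRange (max 0 (seg.1 - lag)) ((min ((gt.length : Int) - 1) (seg.2 + lag)) + 1) 1).foldl
          (fun a j => if PySem.List.pyGetD pred j 0 == 1 && (decide (j < seg.1) || decide (seg.2 < j))
                      then a.set j.toNat 1 else a)
          ((PySem.List.pyRange seg.1 (seg.2 + 1) 1).foldl (fun a j => a.set j.toNat 1) adj))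
      else adj := rfl
  have hB : pvStepB gt (pvPm pred gt.length) lag adj seg =
      if (max 0 (seg.1 - lag)) ≤ (min ((gt.length : Int) - 1) (seg.2 + lag)) ∧
          PySem.List.pyGetD (pvPm pred gt.length) ((min ((gt.length : Int) - 1) (seg.2 + lag)) + 1) 0
            - PySem.List.pyGetD (pvPm pred gt.length) (max 0 (seg.1 - lag)) 0 > 0 then
        (PySem.List.pyRange seg.1 (seg.2 + 1) 1).foldl (fun a j => a.set j.toNat 1) adj
      else adj := rfl
  rw [hA, hB]
  set ws := max 0 (seg.1 - lag) with hws
  set we := min ((gt.length : Int) - 1) (seg.2 + lag) with hwe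
  have hws0 : 0 ≤ ws := le_max_left _ _
  have hwen : we ≤ (gt.length : Int) - 1 := min_le_left _ _
  by_cases hle : ws ≤ we
  · -- nonempty window: A's scan ↔ B's prefix-sum test
    have key : ((PySem.List.pyRange ws (we + 1) 1).any
          (fun j => PySem.List.pyGetD pred j 0 == 1)) = true ↔
        PySem.List.pyGetD (pvPm pred gt.length) (we + 1) 0
          - PySem.List.pyGetD (pvPm pred gt.length) ws 0 > 0 := by
      rw [pvPm_getD pred gt.length (we + 1) (by omega) (by omega),
          pvPm_getD pred gt.length ws hws0 (by omega), List.any_eq_true]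
      have hcnt := pvCnt_lt_iff pred ws.toNat (we + 1).toNat (by omega)
      constructor
      · intro ⟨j, hj, hpj⟩
        rw [PySem.List.mem_pyRange_one] at hj
        rw [beq_iff_eq, PySem.List.pyGetD_of_nonneg _ _ (by omega)] at hpj
        have : pvCnt pred ws.toNat < pvCnt pred (we + 1).toNat :=
          hcnt.mpr ⟨j.toNat, by omega, by omega, hpj⟩
        omega
      · intro hgt
        have : pvCnt pred ws.toNat < pvCnt pred (we + 1).toNat := by omega
        obtain ⟨jn, h1, h2, h3⟩ := hcnt.mp this
        refine ⟨(jn : Int), ?_, ?_⟩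
        · rw [PySem.List.mem_pyRange_one]; omega
        · rw [beq_iff_eq, PySem.List.pyGetD_natCast]; exact h3
    by_cases hfound : ((PySem.List.pyRange ws (we + 1) 1).any
        (fun j => PySem.List.pyGetD pred j 0 == 1)) = true
    · rw [if_pos hfound, if_pos ⟨hle, key.mp hfound⟩]
      -- A's "mark lagged detections" loop is a no-op on the written state
      apply pvFoldl_cond_set_noop
      intro j hj hcj
      rw [PySem.List.mem_pyRange_one] at hj
      rw [Bool.and_eq_true, beq_iff_eq] at hcj
      have hpj : pred.getD j.toNat 0 = 1 := by
        rw [PySem.List.pyGetD_of_nonneg _ _ (by omega)] at hcj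
        exact hcj.1
      have hinv' := pvWr_inv pred (PySem.List.pyRange seg.1 (seg.2 + 1) 1) adj hinv
      have hW1 : ((PySem.List.pyRange seg.1 (seg.2 + 1) 1).foldl
          (fun a j => a.set j.toNat 1) adj).getD j.toNat 0 = 1 := by
        rcases hinv'.2 j.toNat with h' | h'
        · rw [h', hpj]
        · exact h'
      exact pvSet_noop _ j.toNat (by rw [hinv'.1]; omega) hW1
    · rw [if_neg hfound, if_neg (fun hc => hfound (key.mpr hc.2))]
  · -- empty window: A scans nothing, B's guard fails
    rw [PySem.List.pyRange_one_eq_nil (by omega), if_neg (by simp), if_neg (fun hc => hle hc.1)]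

theorem pvStepB_inv (gt P pred : List Int) (lag : Int) (adj : List Int) (seg : Int × Int)
    (hinv : pvInv pred adj) : pvInv pred (pvStepB gt P lag adj seg) := by
  simp only [pvStepB]
  split
  · exact pvWr_inv pred _ adj hinv
  · exact hinv

theorem pvFold_eq (gt pred : List Int) (lag : Int) (segs : List (Int × Int))
    (hb : ∀ se ∈ segs, 0 ≤ se.1 ∧ se.1 ≤ se.2 ∧ se.2 < (gt.length : Int))
    (hnp : gt.length ≤ pred.length) :
    ∀ adj, pvInv pred adj →
      segs.foldl (pvStepA gt pred lag) adj = segs.foldl (pvStepB gt (pvPm pred gt.length) lag) adj := by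
  induction segs with
  | nil => intro adj _; rfl
  | cons se t ih =>
    intro adj hinv
    simp only [List.foldl_cons]
    rw [pvStep_eq gt pred lag adj se (hb se (List.mem_cons_self)) hnp hinv]
    exact ih (fun s hs => hb s (List.mem_cons_of_mem _ hs)) _
      (pvStepB_inv gt _ pred lag adj se hinv)

-- ===== VERDICT (by name: the statement is the Claim_ definition above) =====
theorem apply_lag_tolerance_spec : Claim_equal_apply_lag_tolerance := by
  intro gt pred lag _ hpre
  unfold Spec_apply_lag_tolerance
  show apply_lag_tolerance gt pred lag = apply_lag_tolerance_alt gt pred lag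
  have hA : apply_lag_tolerance gt pred lag = (pvSegsA gt 0).foldl (pvStepA gt pred lag) pred := rfl
  have hB : apply_lag_tolerance_alt gt pred lag
      = pvLoopB gt (pvPm pred gt.length) lag pred 0 := by
    unfold apply_lag_tolerance_alt
    rw [pvBuildP_eq]
  rw [hA, hB, pvLoopB_eq_fold]
  refine pvFold_eq gt pred lag _ ?_ hpre pred ⟨rfl, fun k => Or.inl rfl⟩
  intro se hse
  have := pvSegs_bounds gt 0 se hse
  exact ⟨by exact_mod_cast this.1, this.2.1, this.2.2⟩
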